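-- pv_equiv track=rewrite | github.com/Jagadeesh2205/SHL-Products-Catalog | src/scraper.py | _infer_test_type
-- ===== SOURCE A (Python) =====
-- def _infer_test_type(title: str, description: str, category: str) -> str:
--     """Infer test type from text content"""
--     text = f"{title} {description} {category}".lower()
--
--     # Test type mapping
--     if any(word in text for word in ['personality', 'behavior', 'behaviour', 'motivation', 'opq', 'mq']):
--         return 'P'  # Personality & Behavior
--     elif any(word in text for word in ['cognitive', 'ability', 'reasoning', 'numerical', 'verbal', 'deductive']):
--         return 'C'  # Cognitive
--     elif any(word in text for word in ['skill', 'knowledge', 'technical', 'coding', 'programming', 'java', 'python']):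
--         return 'K'  # Knowledge & Skills
--     elif any(word in text for word in ['situational', 'judgment', 'sjt']):
--         return 'S'  # Situational Judgment
--     else:
--         return 'O'  # Other
-- ===== SOURCE B (Python) =====
-- # Keyword -> priority table; one left-to-right scan of the text keeps the best
-- # (lowest) priority seen at any start position, mapped to a label at the end.
-- KEYWORD_PRIORITY = {
--     'personality': 0, 'behavior': 0, 'behaviour': 0, 'motivation': 0, 'opq': 0, 'mq': 0,
--     'cognitive': 1, 'ability': 1, 'reasoning': 1, 'numerical': 1, 'verbal': 1, 'deductive': 1,
--     'skill': 2, 'knowledge': 2, 'technical': 2, 'coding': 2, 'programming': 2,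
--     'java': 2, 'python': 2,
--     'situational': 3, 'judgment': 3, 'sjt': 3,
-- }
--
-- LABELS = {0: 'P', 1: 'C', 2: 'K', 3: 'S'}
--
--
-- def _infer_test_type(title: str, description: str, category: str) -> str:
--     text = f"{title} {description} {category}".lower()
--     best = 4
--     for i in range(len(text)):
--         for kw, pri in KEYWORD_PRIORITY.items():
--             if pri < best and text.startswith(kw, i):
--                 best = pri
--     return LABELS.get(best, 'O')
-- ===== Notes on version B (the rewrite author's own statement) =====
-- stated objective: alternative
-- what changed: Instead of testing group after group for substring containment, B makes a single left-to-right scan over the text, checking at each position which keywords from a flat keyword->priority dict start there and keeping the minimum priority seen, mapped to a label at the end.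
import Mathlib
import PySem

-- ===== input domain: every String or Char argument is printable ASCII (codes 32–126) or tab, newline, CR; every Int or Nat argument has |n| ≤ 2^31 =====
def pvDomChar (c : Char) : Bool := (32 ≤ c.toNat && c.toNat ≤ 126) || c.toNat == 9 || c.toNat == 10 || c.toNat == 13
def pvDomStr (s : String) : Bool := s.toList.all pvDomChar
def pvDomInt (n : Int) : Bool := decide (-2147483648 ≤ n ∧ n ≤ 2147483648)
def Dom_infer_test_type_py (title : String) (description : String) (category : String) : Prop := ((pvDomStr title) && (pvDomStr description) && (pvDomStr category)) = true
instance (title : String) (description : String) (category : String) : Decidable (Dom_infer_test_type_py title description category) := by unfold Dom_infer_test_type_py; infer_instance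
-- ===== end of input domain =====

-- B replaces A's per-group substring chain by one left-to-right scan of the text that
-- keeps the best (lowest) priority keyword starting at any position (objective: alternative).

-- ===== PORT A =====
def infer_test_type_py (title : String) (description : String) (category : String) : String :=
  let text := PySem.Str.lower (PySem.Str.join " " [title, description, category])
  if ["personality", "behavior", "behaviour", "motivation", "opq", "mq"].any
      (fun w => PySem.Str.isIn w text) then "P"
  else if ["cognitive", "ability", "reasoning", "numerical", "verbal", "deductive"].any
      (fun w => PySem.Str.isIn w text) then "C"
  else if ["skill", "knowledge", "technical", "coding", "programming", "java", "python"].any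
      (fun w => PySem.Str.isIn w text) then "K"
  else if ["situational", "judgment", "sjt"].any
      (fun w => PySem.Str.isIn w text) then "S"
  else "O"

-- ===== PORT B =====
-- Source B's KEYWORD_PRIORITY dict, in insertion order
def pvKeywordPriority : List (String × Nat) :=
  [("personality", 0), ("behavior", 0), ("behaviour", 0), ("motivation", 0), ("opq", 0), ("mq", 0),
   ("cognitive", 1), ("ability", 1), ("reasoning", 1), ("numerical", 1), ("verbal", 1), ("deductive", 1),
   ("skill", 2), ("knowledge", 2), ("technical", 2), ("coding", 2), ("programming", 2),
   ("java", 2), ("python", 2),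
   ("situational", 3), ("judgment", 3), ("sjt", 3)]

-- Source B's LABELS dict
def pvLabels : PySem.Dict Nat String := PySem.Dict.ofList [(0, "P"), (1, "C"), (2, "K"), (3, "S")]

-- the inner-loop body: if pri < best and text.startswith(kw, i): best = pri
-- (text.startswith(kw, i) with 0 ≤ i ≤ len(text) is exactly kw.toList.isPrefixOf (tl.drop i))
def pvInnerStep (tl : List Char) (i : Nat) (best : Nat) (p : String × Nat) : Nat :=
  if p.2 < best && p.1.toList.isPrefixOf (tl.drop i) then p.2 else best

def infer_test_type_py_alt (title : String) (description : String) (category : String) : String :=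
  let text := PySem.Str.lower (PySem.Str.join " " [title, description, category])
  let tl := text.toList
  -- for i in range(len(text)): for kw, pri in KEYWORD_PRIORITY.items(): …
  let best := (List.range tl.length).foldl
    (fun b i => pvKeywordPriority.foldl (pvInnerStep tl i) b) 4
  -- return LABELS.get(best, 'O')
  pvLabels.getD best "O"

-- ===== PRECONDITION & SPEC =====
def Spec_infer_test_type_py (title : String) (description : String) (category : String) (out : String) : Prop := out = infer_test_type_py_alt title description category
instance (title : String) (description : String) (category : String) (out : String) : Decidable (Spec_infer_test_type_py title description category out) := by unfold Spec_infer_test_type_py; infer_instance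

-- ===== CLAIM (what is proved, stated in full; the proofs are below) =====
def Claim_equal_infer_test_type_py : Prop := ∀ (title : String) (description : String) (category : String), Dom_infer_test_type_py title description category → Spec_infer_test_type_py title description category (infer_test_type_py title description category)

-- ===== LEMMAS AND PROOFS =====

-- the priorities of keywords matched at some position of the scan
def pvMs (tl : List Char) : List Nat :=
  (List.range tl.length).flatMap
    (fun i => ((pvKeywordPriority.filter (fun p => p.1.toList.isPrefixOf (tl.drop i))).map (·.2)))

theorem pvInner_eq_min (tl : List Char) (i : Nat) :
    ∀ (K : List (String × Nat)) (a : Nat),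
    K.foldl (pvInnerStep tl i) a
      = ((K.filter (fun p => p.1.toList.isPrefixOf (tl.drop i))).map (·.2)).foldl min a := by
  intro K
  induction K with
  | nil => intro a; rfl
  | cons p rest ih =>
      intro a
      by_cases h : p.1.toList.isPrefixOf (tl.drop i) = true
      · simp only [List.foldl_cons, List.filter_cons, h, if_true, List.map_cons, pvInnerStep,
          Bool.and_true]
        rw [show (if decide (p.2 < a) = true then p.2 else a) = min a p.2 from by
          by_cases h' : p.2 < a <;> simp [h'] <;> omega, ih]
      · simp [pvInnerStep, h, ih]

theorem pvScan_eq_min (tl : List Char) :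
    ∀ (l : List Nat) (a : Nat),
    l.foldl (fun b i => pvKeywordPriority.foldl (pvInnerStep tl i) b) a
      = (l.flatMap
          (fun i => ((pvKeywordPriority.filter (fun p => p.1.toList.isPrefixOf (tl.drop i))).map (·.2)))).foldl min a := by
  intro l
  induction l with
  | nil => intro a; simp
  | cons i rest ih =>
      intro a
      rw [List.flatMap_cons, List.foldl_append, List.foldl_cons, pvInner_eq_min, ih]

theorem pvFoldlMin_le_init (l : List Nat) (a : Nat) : l.foldl min a ≤ a := by
  induction l generalizing a with
  | nil => simp
  | cons x rest ih => exact le_trans (ih (min a x)) (by omega)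

theorem pvFoldlMin_le_mem (l : List Nat) : ∀ (a x : Nat), x ∈ l → l.foldl min a ≤ x := by
  induction l with
  | nil => intro _ _ h; cases h
  | cons y rest ih =>
      intro a x h
      rcases List.mem_cons.mp h with rfl | h'
      · exact le_trans (pvFoldlMin_le_init rest (min a x)) (by omega)
      · exact ih (min a y) x h' 

theorem pvFoldlMin_mem (l : List Nat) (a : Nat) : l.foldl min a = a ∨ l.foldl min a ∈ l := by
  induction l generalizing a with
  | nil => left; rfl
  | cons y rest ih =>
      rcases ih (min a y) with h | h
      · rcases Nat.le_total a y with hay | hay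
        · left; rw [List.foldl_cons, h, Nat.min_eq_left hay]
        · right
          rw [List.foldl_cons, h, Nat.min_eq_right hay]
          exact List.mem_cons_self
      · right; exact List.mem_cons_of_mem _ h

theorem pvMem_pvMs {tl : List Char} {p : Nat} :
    p ∈ pvMs tl ↔ ∃ i < tl.length, ∃ kw : String, (kw, p) ∈ pvKeywordPriority ∧ kw.toList <+: tl.drop i := by
  simp only [pvMs, List.mem_flatMap, List.mem_map, List.mem_filter, List.mem_range]
  constructor
  · rintro ⟨i, hi, q, ⟨hq, hpre⟩, rfl⟩
    exact ⟨i, hi, q.1, hq, List.isPrefixOf_iff_prefix.mp hpre⟩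
  · rintro ⟨i, hi, kw, hkw, hpre⟩
    exact ⟨i, hi, (kw, p), ⟨hkw, List.isPrefixOf_iff_prefix.mpr hpre⟩, rfl⟩

theorem pvPrefix_lt {w : List Char} {tl : List Char} {j : Nat}
    (h : w <+: tl.drop j) (hne : w ≠ []) : j < tl.length := by
  by_contra hle
  rw [List.drop_eq_nil_of_le (by omega)] at h
  exact hne (List.prefix_nil.mp h)

theorem pvGroup_iff (tl : List Char) (j : Nat) (group : List String)
    (hfwd : ∀ p ∈ pvKeywordPriority, p.2 = j → p.1 ∈ group)
    (hback : ∀ w ∈ group, (w, j) ∈ pvKeywordPriority)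
    (hne : ∀ w ∈ group, w.toList ≠ []) :
    j ∈ pvMs tl ↔ group.any (fun w => PySem.Chars.isIn w.toList tl) = true := by
  rw [pvMem_pvMs, List.any_eq_true]
  constructor
  · rintro ⟨i, _, kw, hkw, hpre⟩
    exact ⟨kw, hfwd (kw, j) hkw rfl, (PySem.Chars.exists_prefix_drop_iff_isIn _ _).mp ⟨i, hpre⟩⟩
  · rintro ⟨w, hw, hin⟩
    obtain ⟨i, hpre⟩ := (PySem.Chars.exists_prefix_drop_iff_isIn _ _).mpr hin
    exact ⟨i, pvPrefix_lt hpre (hne w hw), w, hback w hw, hpre⟩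

theorem pvAlt_eq (title description category : String) :
    infer_test_type_py_alt title description category
      = pvLabels.getD ((pvMs ((PySem.Str.lower (PySem.Str.join " " [title, description, category])).toList)).foldl min 4) "O" := by
  simp only [infer_test_type_py_alt]
  rw [pvScan_eq_min]
  rw [pvMs]

theorem pvMain (tl : List Char) :
    (if (["personality", "behavior", "behaviour", "motivation", "opq", "mq"].any
        (fun w => PySem.Chars.isIn w.toList tl)) = true then "P"
     else if (["cognitive", "ability", "reasoning", "numerical", "verbal", "deductive"].any
        (fun w => PySem.Chars.isIn w.toList tl)) = true then "C"
     else if (["skill", "knowledge", "technical", "coding", "programming", "java", "python"].any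
        (fun w => PySem.Chars.isIn w.toList tl)) = true then "K"
     else if (["situational", "judgment", "sjt"].any
        (fun w => PySem.Chars.isIn w.toList tl)) = true then "S"
     else "O") = pvLabels.getD ((pvMs tl).foldl min 4) "O" := by
  have hP := pvGroup_iff tl 0 ["personality", "behavior", "behaviour", "motivation", "opq", "mq"]
    (by decide) (by decide) (by decide)
  have hC := pvGroup_iff tl 1 ["cognitive", "ability", "reasoning", "numerical", "verbal", "deductive"]
    (by decide) (by decide) (by decide)
  have hK := pvGroup_iff tl 2 ["skill", "knowledge", "technical", "coding", "programming", "java", "python"]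
    (by decide) (by decide) (by decide)
  have hS := pvGroup_iff tl 3 ["situational", "judgment", "sjt"]
    (by decide) (by decide) (by decide)
  have hmemval : ∀ j : Nat, (pvMs tl).foldl min 4 = j → j ≠ 4 → j ∈ pvMs tl := by
    intro j hj hne
    rcases pvFoldlMin_mem (pvMs tl) 4 with h | h
    · omega
    · exact hj ▸ h
  by_cases hbP : (["personality", "behavior", "behaviour", "motivation", "opq", "mq"].any
      (fun w => PySem.Chars.isIn w.toList tl)) = true
  · have h0 : (pvMs tl).foldl min 4 = 0 :=
      Nat.le_zero.mp (pvFoldlMin_le_mem _ 4 0 (hP.mpr hbP))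
    rw [h0]
    simp [hbP]
    decide
  by_cases hbC : (["cognitive", "ability", "reasoning", "numerical", "verbal", "deductive"].any
      (fun w => PySem.Chars.isIn w.toList tl)) = true
  · have hle : (pvMs tl).foldl min 4 ≤ 1 := pvFoldlMin_le_mem _ 4 1 (hC.mpr hbC)
    have h1 : (pvMs tl).foldl min 4 = 1 := by
      rcases Nat.lt_or_ge ((pvMs tl).foldl min 4) 1 with h | h
      · exact absurd (hP.mp (hmemval 0 (by omega) (by omega))) hbP
      · omega
    rw [h1]
    simp [hbP, hbC]
    decide
  by_cases hbK : (["skill", "knowledge", "technical", "coding", "programming", "java", "python"].any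
      (fun w => PySem.Chars.isIn w.toList tl)) = true
  · have hle : (pvMs tl).foldl min 4 ≤ 2 := pvFoldlMin_le_mem _ 4 2 (hK.mpr hbK)
    have h2 : (pvMs tl).foldl min 4 = 2 := by
      rcases Nat.lt_or_ge ((pvMs tl).foldl min 4) 2 with h | h
      · rcases Nat.lt_or_ge ((pvMs tl).foldl min 4) 1 with h' | h'
        · exact absurd (hP.mp (hmemval 0 (by omega) (by omega))) hbP
        · exact absurd (hC.mp (hmemval 1 (by omega) (by omega))) hbC
      · omega
    rw [h2]
    simp [hbP, hbC, hbK]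
    decide
  by_cases hbS : (["situational", "judgment", "sjt"].any
      (fun w => PySem.Chars.isIn w.toList tl)) = true
  · have hle : (pvMs tl).foldl min 4 ≤ 3 := pvFoldlMin_le_mem _ 4 3 (hS.mpr hbS)
    have h3 : (pvMs tl).foldl min 4 = 3 := by
      rcases Nat.lt_or_ge ((pvMs tl).foldl min 4) 3 with h | h
      · rcases Nat.lt_or_ge ((pvMs tl).foldl min 4) 1 with h' | h'
        · exact absurd (hP.mp (hmemval 0 (by omega) (by omega))) hbP
        · rcases Nat.lt_or_ge ((pvMs tl).foldl min 4) 2 with h'' | h''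
          · exact absurd (hC.mp (hmemval 1 (by omega) (by omega))) hbC
          · exact absurd (hK.mp (hmemval 2 (by omega) (by omega))) hbK
      · omega
    rw [h3]
    simp [hbP, hbC, hbK, hbS]
    decide
  · have h4 : (pvMs tl).foldl min 4 = 4 := by
      rcases pvFoldlMin_mem (pvMs tl) 4 with h | h
      · exact h
      · exfalso
        obtain ⟨i, hi, kw, hkw, hpre⟩ := pvMem_pvMs.mp h
        have hcases : ∀ q ∈ pvKeywordPriority, q.2 = 0 ∨ q.2 = 1 ∨ q.2 = 2 ∨ q.2 = 3 := by decide
        have hj := hcases (kw, _) hkw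
        simp only at hj
        rcases hj with hm | hm | hm | hm
        · exact hbP (hP.mp (hm ▸ h))
        · exact hbC (hC.mp (hm ▸ h))
        · exact hbK (hK.mp (hm ▸ h))
        · exact hbS (hS.mp (hm ▸ h))
    rw [h4]
    simp [hbP, hbC, hbK, hbS]
    decide

-- ===== VERDICT (by name: the statement is the Claim_ definition above) =====
theorem infer_test_type_py_spec : Claim_equal_infer_test_type_py := by
  intro title description category _
  unfold Spec_infer_test_type_py
  rw [pvAlt_eq]
  unfold infer_test_type_py
  simp only [PySem.Str.isIn_eq]
  exact pvMain _
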